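-- pv_equiv track=rewrite | github.com/daniel-reich/ubiquitous-fiesta | 8xwqLZuTAsLpNSPEn_14.py | award_prizes
-- ===== SOURCE A (Python) =====
-- def award_prizes(names):
--     d={}
--     x=sorted(names.values())[-3:]
--     for i in names.keys():
--         if names[i]==x[-1]:
--             d[i]='Gold'
--         elif names[i]==x[1]:
--             d[i]='Silver'
--         elif names[i]==x[0]:
--             d[i]='Bronze'
--         else:
--             d[i]="Participation"
--     return d
-- ===== SOURCE B (Python) =====
-- def award_prizes(names):
--     # One pass over the scores maintaining an ascending buffer of the (up to)
--     # three largest values, instead of sorting all values; then one table lookup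
--     # per name instead of a per-name comparison chain.
--     top = []
--     for v in names.values():
--         i = 0
--         while i < len(top) and top[i] <= v:
--             i += 1
--         top.insert(i, v)
--         if len(top) > 3:
--             del top[0]
--     if not top:
--         return {}
--     labels = {top[0]: 'Bronze'}
--     if len(top) > 1:
--         labels[top[1]] = 'Silver'
--     labels[top[-1]] = 'Gold'
--     return {n: labels.get(v, 'Participation') for n, v in names.items()}
-- ===== Notes on version B (the rewrite author's own statement) =====
-- stated objective: alternative
-- what changed: B never sorts: a single streaming pass keeps an ascending buffer of the up-to-three largest scores (bounded ordered insert, dropping the minimum when the buffer exceeds 3), then builds the score-to-label table once (Bronze, Silver, Gold in that order so later inserts win on ties) and maps every name through one table lookup, replacing A's sort of all values plus per-name four-way comparison chain.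
import Mathlib
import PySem

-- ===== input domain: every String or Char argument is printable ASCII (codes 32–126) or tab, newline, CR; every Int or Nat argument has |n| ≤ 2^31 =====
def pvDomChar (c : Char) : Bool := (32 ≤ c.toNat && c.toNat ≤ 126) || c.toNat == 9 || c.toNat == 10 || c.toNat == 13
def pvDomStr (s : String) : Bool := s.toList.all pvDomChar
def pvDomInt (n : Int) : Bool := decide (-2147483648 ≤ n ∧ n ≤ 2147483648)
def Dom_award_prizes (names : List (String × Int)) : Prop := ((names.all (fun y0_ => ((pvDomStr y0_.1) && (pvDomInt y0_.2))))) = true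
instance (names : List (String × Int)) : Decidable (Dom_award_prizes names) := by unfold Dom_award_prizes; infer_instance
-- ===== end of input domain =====

-- B replaces A's sort of all values by a single streaming pass keeping an ascending
-- buffer of the up-to-three largest scores, and A's per-name comparison chain by a
-- score→label table built once; objective: alternative algorithm, same results.

-- ===== PORT A =====
-- the dict parameter arrives as an association list; dict construction = PySem.Dict.ofList
def award_prizes (names : List (String × Int)) : List (String × String) :=
  let nd := PySem.Dict.ofList names
  let x := PySem.List.slice (PySem.List.sorted (PySem.Dict.values nd) (fun v => v)) (some (-3)) none
  ((PySem.Dict.keys nd).foldl (fun d i =>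
      d.insert i
        (if some (nd.getD i 0) = PySem.List.pyGet? x (-1) then "Gold"
         else if some (nd.getD i 0) = PySem.List.pyGet? x 1 then "Silver"
         else if some (nd.getD i 0) = PySem.List.pyGet? x 0 then "Bronze"
         else "Participation"))
    PySem.Dict.empty).items

-- ===== PORT B =====
-- the inner while loop of Source B scans the ≤3-element buffer left to right for the
-- insertion point; ported as the structurally identical left-to-right recursion
def pvIns (t : List Int) (v : Int) : List Int :=
  match t with
  | [] => [v]
  | h :: r => if h ≤ v then h :: pvIns r v else v :: h :: r

-- one loop iteration of Source B: ordered insert, then `del top[0]` when the buffer exceeds 3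
def pvStep (t : List Int) (v : Int) : List Int :=
  let u := pvIns t v
  if 3 < u.length then u.tail else u

-- top[0], top[1], top[-1] are in range whenever reached (top nonempty; the length guard):
-- ported with pyGetD, exact on every reached index
def award_prizes_alt (names : List (String × Int)) : List (String × String) :=
  let nd := PySem.Dict.ofList names
  let top := (PySem.Dict.values nd).foldl pvStep []
  if top = [] then []
  else
    let t0 : PySem.Dict Int String := PySem.Dict.empty.insert (PySem.List.pyGetD top 0 0) "Bronze"
    let t1 := if 1 < top.length then t0.insert (PySem.List.pyGetD top 1 0) "Silver" else t0
    let t := t1.insert (PySem.List.pyGetD top (-1) 0) "Gold"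
    nd.items.map (fun p => (p.1, t.getD p.2 "Participation"))

-- ===== PRECONDITION & SPEC =====
def Spec_award_prizes (names : List (String × Int)) (out : List (String × String)) : Prop := out = award_prizes_alt names
instance (names : List (String × Int)) (out : List (String × String)) : Decidable (Spec_award_prizes names out) := by unfold Spec_award_prizes; infer_instance

-- ===== CLAIM (what is proved, stated in full; the proofs are below) =====
def Claim_equal_award_prizes : Prop := ∀ (names : List (String × Int)), Dom_award_prizes names → Spec_award_prizes names (award_prizes names)

-- ===== LEMMAS AND PROOFS =====

theorem pv_length_ins (t : List Int) (v : Int) : (pvIns t v).length = t.length + 1 := by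
  induction t with
  | nil => rfl
  | cons h r ih => simp only [pvIns]; split <;> simp [ih]

theorem pv_ins_perm (t : List Int) (v : Int) : (pvIns t v).Perm (v :: t) := by
  induction t with
  | nil => rfl
  | cons h r ih =>
      simp only [pvIns]; split
      · exact (ih.cons h).trans (List.Perm.swap v h r)
      · rfl

theorem pv_ins_pairwise (t : List Int) (v : Int) (h : t.Pairwise (· ≤ ·)) :
    (pvIns t v).Pairwise (· ≤ ·) := by
  induction t with
  | nil => simp [pvIns]
  | cons a r ih =>
      rcases List.pairwise_cons.mp h with ⟨ha, hr⟩
      simp only [pvIns]; split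
      · rename_i hav
        refine List.pairwise_cons.mpr ⟨?_, ih hr⟩
        intro b hb
        rcases List.mem_cons.mp ((pv_ins_perm r v).mem_iff.mp hb) with rfl | hb
        · exact hav
        · exact ha b hb
      · rename_i hav
        refine List.pairwise_cons.mpr ⟨?_, h⟩
        intro b hb
        rcases List.mem_cons.mp hb with rfl | hb
        · omega
        · exact le_trans (by omega) (ha b hb)

theorem pv_foldl_ins_perm (l : List Int) : ∀ acc : List Int, (l.foldl pvIns acc).Perm (acc ++ l) := by
  induction l with
  | nil => intro acc; simp
  | cons v l ih =>
      intro acc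
      exact ((ih (pvIns acc v)).trans
        (((pv_ins_perm acc v).append_right l).trans List.perm_middle.symm))

theorem pv_foldl_ins_pairwise (l : List Int) : ∀ acc : List Int, acc.Pairwise (· ≤ ·) →
    (l.foldl pvIns acc).Pairwise (· ≤ ·) := by
  induction l with
  | nil => intro acc h; simpa
  | cons v l ih => intro acc h; exact ih _ (pv_ins_pairwise acc v h)

-- sorted(l) equals the ordered-insert fold (both are ≤-sorted rearrangements of l)
theorem pv_sorted_eq_foldl_ins (l : List Int) :
    PySem.List.sorted l (fun v => v) = l.foldl pvIns [] := by
  exact PySem.List.sorted_id_eq_of_perm_of_pairwise _ _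
    (by simpa using pv_foldl_ins_perm l []) (pv_foldl_ins_pairwise l [] (by simp))

-- dropping k elements commutes with the ordered insert (k ≤ length)
theorem pv_drop_ins (v : Int) : ∀ (S : List Int) (k : Nat), k ≤ S.length →
    List.drop k (pvIns S v) =
      if (S.take k).all (fun a => decide (a ≤ v)) then pvIns (List.drop k S) v
      else List.drop (k - 1) S := by
  intro S
  induction S with
  | nil =>
      intro k hk
      have hk0 : k = 0 := by simpa using hk
      subst hk0
      simp [pvIns]
  | cons a T ih =>
      intro k hk
      match k with
      | 0 => simp
      | Nat.succ j =>
          have hj : j ≤ T.length := by simpa using hk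
          simp only [pvIns]
          by_cases hav : a ≤ v
          · rw [if_pos hav]
            have := ih j hj
            by_cases hall : (T.take j).all (fun a => decide (a ≤ v))
            · simp [hall, hav, this]
            · rw [List.drop_succ_cons, this, if_neg hall]
              have hj1 : j ≠ 0 := by
                intro h0; subst h0; simp at hall
              simp only [List.take_succ_cons, List.all_cons, hav, decide_true, Bool.true_and, hall]
              match j, hj1 with
              | Nat.succ m, _ => simp
          · rw [if_neg hav]
            simp [hav]

-- one buffer step tracks the top-3 suffix of the sorted list
theorem pv_step_top (S : List Int) (hs : S.Pairwise (· ≤ ·)) (v : Int) :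
    pvStep (S.drop (S.length - 3)) v = (pvIns S v).drop (S.length + 1 - 3) := by
  by_cases hlen : S.length ≤ 2
  · have h1 : S.length - 3 = 0 := by omega
    have h2 : S.length + 1 - 3 = 0 := by omega
    rw [h1, h2, List.drop_zero, List.drop_zero]
    unfold pvStep
    have : ¬ 3 < (pvIns S v).length := by rw [pv_length_ins]; omega
    simp [this]
  · -- S.length ≥ 3
    have h3 : 3 ≤ S.length := by omega
    have hk : S.length - 2 ≤ S.length := by omega
    have hidx : S.length - 3 < S.length := by omega
    -- B := S.drop (S.length - 3) = S[|S|-3] :: S.drop (|S|-2)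
    have hB : S.drop (S.length - 3) = S[S.length - 3] :: S.drop (S.length - 2) := by
      have h' : S.length - 3 + 1 = S.length - 2 := by omega
      rw [List.drop_eq_getElem_cons hidx, h']
    have hmono : ∀ i (hi : i < S.length), i ≤ S.length - 3 → S[i] ≤ S[S.length - 3] := by
      intro i hi hile
      rcases Nat.lt_or_ge i (S.length - 3) with h | h
      · exact List.pairwise_iff_getElem.mp hs i (S.length - 3) hi hidx h
      · have : i = S.length - 3 := by omega
        subst this; rfl
    have hcond : ((S.take (S.length - 2)).all (fun a => decide (a ≤ v))) = decide (S[S.length - 3] ≤ v) := by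
      by_cases hbv : S[S.length - 3] ≤ v
      · simp only [hbv, decide_true]
        rw [List.all_eq_true]
        intro a ha
        rw [List.mem_take_iff_getElem] at ha
        obtain ⟨i, hi, rfl⟩ := ha
        have hi' : i < S.length := by omega
        exact decide_eq_true (le_trans (hmono i hi' (by omega)) hbv)
      · simp only [hbv, decide_false]
        rw [Bool.eq_false_iff, ne_eq, List.all_eq_true]
        intro hall
        apply hbv
        have hmem : S[S.length - 3] ∈ S.take (S.length - 2) := by
          rw [List.mem_take_iff_getElem]
          exact ⟨S.length - 3, by omega, rfl⟩
        simpa using hall _ hmem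
    have hrhs := pv_drop_ins v S (S.length - 2) hk
    have harith : S.length + 1 - 3 = S.length - 2 := by omega
    rw [harith, hrhs, hcond]
    -- LHS
    rw [hB]
    unfold pvStep
    simp only [pvIns]
    by_cases hbv : S[S.length - 3] ≤ v
    · rw [if_pos hbv]
      have hlen4 : (S[S.length - 3] :: pvIns (S.drop (S.length - 2)) v).length = 4 := by
        rw [List.length_cons, pv_length_ins, List.length_drop]
        omega
      simp only [hlen4]
      norm_num
      simp [hbv]
    · rw [if_neg hbv]
      have hlen4 : (v :: S[S.length - 3] :: S.drop (S.length - 2)).length = 4 := by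
        simp only [List.length_cons, List.length_drop]
        omega
      simp only [hlen4]
      norm_num
      simp only [hbv]
      rw [← hB]
      simp
      omega

-- the whole fold equals the top-3 suffix of the insertion-sort fold
theorem pv_fold_drop (l : List Int) :
    l.foldl pvStep [] = (l.foldl pvIns []).drop ((l.foldl pvIns []).length - 3) := by
  induction l using List.reverseRecOn with
  | nil => rfl
  | append_singleton l v ih =>
      rw [List.foldl_append, List.foldl_append]
      simp only [List.foldl_cons, List.foldl_nil]
      rw [ih]
      have hs := pv_foldl_ins_pairwise l [] (by simp)
      rw [pv_step_top _ hs v, pv_length_ins]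

-- per-score agreement of A's comparison chain with B's score→label table, |x| ∈ {1,2,3}
theorem pv_table_chain (x : List Int) (hx : x ≠ []) (hx3 : x.length ≤ 3) (s : Int) :
    (if some s = PySem.List.pyGet? x (-1) then "Gold"
     else if some s = PySem.List.pyGet? x 1 then "Silver"
     else if some s = PySem.List.pyGet? x 0 then "Bronze"
     else "Participation")
    = PySem.Dict.getD
        ((if 1 < x.length then
            (PySem.Dict.empty.insert (PySem.List.pyGetD x 0 0) "Bronze").insert (PySem.List.pyGetD x 1 0) "Silver"
          else
            PySem.Dict.empty.insert (PySem.List.pyGetD x 0 0) "Bronze").insert (PySem.List.pyGetD x (-1) 0) "Gold")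
        s "Participation" := by
  match x, hx3 with
  | [a], _ =>
      simp [PySem.List.pyGet?, PySem.List.pyIdx?, PySem.List.pyGetD, PySem.Dict.getD_insert]
  | [a, b], _ =>
      simp [PySem.List.pyGet?, PySem.List.pyIdx?, PySem.List.pyGetD, PySem.Dict.getD_insert]
  | [a, b, c], _ =>
      simp [PySem.List.pyGet?, PySem.List.pyIdx?, PySem.List.pyGetD, PySem.Dict.getD_insert]
  | a :: b :: c :: d :: t, h3 => simp at h3; omega

-- ===== VERDICT (by name: the statement is the Claim_ definition above) =====
theorem award_prizes_spec : Claim_equal_award_prizes := by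
  intro names _
  unfold Spec_award_prizes award_prizes award_prizes_alt
  dsimp only
  set nd := PySem.Dict.ofList names with hnd
  have hn : nd.keys.Nodup := PySem.Dict.nodup_keys_ofList names
  -- B's buffer equals A's slice of the sorted values
  have htop : (PySem.Dict.values nd).foldl pvStep []
      = PySem.List.slice (PySem.List.sorted (PySem.Dict.values nd) (fun v => v)) (some (-3)) none := by
    rw [PySem.List.slice_from_neg_ofNat _ 3 (by omega), pv_fold_drop,
      pv_sorted_eq_foldl_ins]
  rw [htop]
  set x := PySem.List.slice (PySem.List.sorted (PySem.Dict.values nd) (fun v => v)) (some (-3)) none with hxdef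
  by_cases he : nd.items = []
  · have hk : nd.keys = [] := by simp [PySem.Dict.keys, he]
    have hv : nd.values = [] := by simp [PySem.Dict.values, he]
    have hx0 : x = [] := by
      rw [hxdef, hv]
      rfl
    simp [hk, hx0, PySem.Dict.empty]
  · have hvlen : nd.values.length = nd.items.length := by simp [PySem.Dict.values]
    have hilen : 0 < nd.items.length := List.length_pos_iff.mpr he
    have hxlen : x.length = nd.items.length - (nd.items.length - 3) := by
      rw [hxdef, PySem.List.slice_from_neg_ofNat _ 3 (by omega), List.length_drop,
        PySem.List.length_sorted, hvlen]
    have hxnil : x ≠ [] := by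
      intro h0
      rw [h0] at hxlen
      simp at hxlen
      omega
    have hx3 : x.length ≤ 3 := by omega
    rw [if_neg hxnil]
    rw [PySem.Dict.items_foldl_insert_fresh nd.keys (fun i => i) _ PySem.Dict.empty
        (fun a _ => PySem.Dict.contains_empty a) (by simpa using hn)]
    rw [PySem.Dict.items_eq_map_keys nd hn 0]
    simp only [PySem.Dict.empty, List.nil_append, List.map_map]
    apply List.map_congr_left
    intro i _
    simp only [Function.comp]
    rw [pv_table_chain x hxnil hx3 (nd.getD i 0)]
    rfl
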